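-- pv_equiv track=rewrite | github.com/imlinux/study_py | example/t3.py | recognize_line_y
-- ===== SOURCE A (Python) =====
-- def recognize_line_y(line_xs, line_ys, num, num1, num2):
--     x_line_list = []
--     for k in [-3, -2, -1, 0, 1, 2, 3]:
--         for i in range(len(line_xs)):
--             if line_ys[i] == num + k:
--                 if line_xs[i] >= num1 and line_xs[i] <= num2 and line_xs[i] not in x_line_list:
--                     x_line_list.append(line_xs[i])
--     len_list = len(x_line_list)
--
--     return len_list
-- ===== SOURCE B (Python) =====
-- def recognize_line_y(line_xs, line_ys, num, num1, num2):
--     return len({x for x, y in zip(line_xs, line_ys)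
--                 if abs(y - num) <= 3 and num1 <= x <= num2})
-- ===== Notes on version B (the rewrite author's own statement) =====
-- stated objective: faster
-- what changed: Replaces the 7 passes over the data with a quadratic membership test on a growing list by a single zip pass with a range test |y-num|<=3 and a set for deduplication.
import Mathlib
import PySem

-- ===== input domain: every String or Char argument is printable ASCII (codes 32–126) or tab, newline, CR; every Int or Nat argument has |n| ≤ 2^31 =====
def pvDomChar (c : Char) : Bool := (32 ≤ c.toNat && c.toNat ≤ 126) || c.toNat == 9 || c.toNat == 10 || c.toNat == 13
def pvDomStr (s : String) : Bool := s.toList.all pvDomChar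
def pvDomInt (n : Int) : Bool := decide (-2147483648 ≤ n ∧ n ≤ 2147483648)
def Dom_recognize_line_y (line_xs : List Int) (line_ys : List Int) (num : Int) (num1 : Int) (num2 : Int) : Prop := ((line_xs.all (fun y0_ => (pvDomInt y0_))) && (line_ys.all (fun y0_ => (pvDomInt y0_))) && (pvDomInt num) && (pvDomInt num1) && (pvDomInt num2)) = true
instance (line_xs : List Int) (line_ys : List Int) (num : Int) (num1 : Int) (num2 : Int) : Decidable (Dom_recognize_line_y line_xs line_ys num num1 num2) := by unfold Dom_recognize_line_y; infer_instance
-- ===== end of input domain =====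

-- B replaces A's 7 outer passes with a quadratic list-membership test by one zip pass
-- filtered with |y - num| ≤ 3 and deduplicated by a set (objective: faster).

-- ===== PORT A =====
-- inner 'for i in range(len(line_xs))' loop of A, for one fixed k
-- (pyGetD is the total form of line_ys[i]/line_xs[i]; exact under Pre_, where every index is in range)
def pvInnerA (line_xs : List Int) (line_ys : List Int) (num : Int) (num1 : Int) (num2 : Int) (k : Int) (acc : List Int) : List Int :=
  (PySem.List.pyRange 0 (line_xs.length : Int) 1).foldl (fun acc2 i =>
    if PySem.List.pyGetD line_ys i 0 = num + k then
      if num1 ≤ PySem.List.pyGetD line_xs i 0 ∧ PySem.List.pyGetD line_xs i 0 ≤ num2 ∧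
          PySem.List.pyGetD line_xs i 0 ∉ acc2 then
        acc2 ++ [PySem.List.pyGetD line_xs i 0]
      else acc2
    else acc2) acc

def recognize_line_y (line_xs : List Int) (line_ys : List Int) (num : Int) (num1 : Int) (num2 : Int) : Int :=
  (((([-3, -2, -1, 0, 1, 2, 3] : List Int).foldl
      (fun acc k => pvInnerA line_xs line_ys num num1 num2 k acc) []).length : Int))

-- ===== PORT B =====
-- the set comprehension {x for x, y in zip(line_xs, line_ys) if abs(y - num) <= 3 and num1 <= x <= num2}
def recognize_line_y_alt (line_xs : List Int) (line_ys : List Int) (num : Int) (num1 : Int) (num2 : Int) : Int :=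
  ((PySem.Set.ofList
      (((line_xs.zip line_ys).filter
          (fun p => decide (|p.2 - num| ≤ 3 ∧ num1 ≤ p.1 ∧ p.1 ≤ num2))).map Prod.fst)).length : Int)

-- ===== PRECONDITION & SPEC =====
-- A indexes line_ys[i] for every i < len(line_xs), so it raises IndexError when line_ys is shorter.
def Pre_recognize_line_y (line_xs : List Int) (line_ys : List Int) (num : Int) (num1 : Int) (num2 : Int) : Prop :=
  line_xs.length ≤ line_ys.length
instance (line_xs : List Int) (line_ys : List Int) (num : Int) (num1 : Int) (num2 : Int) : Decidable (Pre_recognize_line_y line_xs line_ys num num1 num2) := by unfold Pre_recognize_line_y; infer_instance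

def pvWitness_recognize_line_y : List Int × List Int × Int × Int × Int := ([1, 2, 1], [0, 1, 9], 0, 0, 5)

def Spec_recognize_line_y (line_xs : List Int) (line_ys : List Int) (num : Int) (num1 : Int) (num2 : Int) (out : Int) : Prop := out = recognize_line_y_alt line_xs line_ys num num1 num2
instance (line_xs : List Int) (line_ys : List Int) (num : Int) (num1 : Int) (num2 : Int) (out : Int) : Decidable (Spec_recognize_line_y line_xs line_ys num num1 num2 out) := by unfold Spec_recognize_line_y; infer_instance

-- ===== CLAIM (what is proved, stated in full; the proofs are below) =====
def Claim_equal_recognize_line_y : Prop := ∀ (line_xs : List Int) (line_ys : List Int) (num : Int) (num1 : Int) (num2 : Int), Dom_recognize_line_y line_xs line_ys num num1 num2 → Pre_recognize_line_y line_xs line_ys num num1 num2 → Spec_recognize_line_y line_xs line_ys num num1 num2 (recognize_line_y line_xs line_ys num num1 num2)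

-- ===== LEMMAS AND PROOFS =====

-- membership in the inner loop's accumulator, over an arbitrary index list
theorem pvMemInnerA (line_xs line_ys : List Int) (num num1 num2 k : Int) :
    ∀ (L : List Int) (acc : List Int) (x : Int),
      x ∈ L.foldl (fun acc2 i =>
          if PySem.List.pyGetD line_ys i 0 = num + k then
            if num1 ≤ PySem.List.pyGetD line_xs i 0 ∧ PySem.List.pyGetD line_xs i 0 ≤ num2 ∧
                PySem.List.pyGetD line_xs i 0 ∉ acc2 then
              acc2 ++ [PySem.List.pyGetD line_xs i 0]
            else acc2
          else acc2) acc
        ↔ x ∈ acc ∨ ∃ i ∈ L, PySem.List.pyGetD line_ys i 0 = num + k ∧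
            num1 ≤ PySem.List.pyGetD line_xs i 0 ∧ PySem.List.pyGetD line_xs i 0 ≤ num2 ∧
            x = PySem.List.pyGetD line_xs i 0 := by
  intro L
  induction L with
  | nil => simp
  | cons j L ih =>
    intro acc x
    simp only [List.foldl_cons, List.mem_cons]
    rw [ih]
    split_ifs with h1 h2 <;> simp_all <;> aesop

-- the inner loop keeps the accumulator duplicate-free
theorem pvNodupInnerA (line_xs line_ys : List Int) (num num1 num2 k : Int) :
    ∀ (L : List Int) (acc : List Int), acc.Nodup →
      (L.foldl (fun acc2 i =>
          if PySem.List.pyGetD line_ys i 0 = num + k then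
            if num1 ≤ PySem.List.pyGetD line_xs i 0 ∧ PySem.List.pyGetD line_xs i 0 ≤ num2 ∧
                PySem.List.pyGetD line_xs i 0 ∉ acc2 then
              acc2 ++ [PySem.List.pyGetD line_xs i 0]
            else acc2
          else acc2) acc).Nodup := by
  intro L
  induction L with
  | nil => simp
  | cons j L ih =>
    intro acc hacc
    simp only [List.foldl_cons]
    apply ih
    split_ifs with h1 h2
    · simp [List.nodup_append, hacc]
      intro a ha he
      exact h2.2.2 (he ▸ ha)
    · exact hacc
    · exact hacc

-- membership after the outer loop over the k-list
theorem pvMemOuterA (line_xs line_ys : List Int) (num num1 num2 : Int) :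
    ∀ (ks : List Int) (acc : List Int) (x : Int),
      x ∈ ks.foldl (fun acc k => pvInnerA line_xs line_ys num num1 num2 k acc) acc
        ↔ x ∈ acc ∨ ∃ k ∈ ks, ∃ i ∈ PySem.List.pyRange 0 (line_xs.length : Int) 1,
            PySem.List.pyGetD line_ys i 0 = num + k ∧
            num1 ≤ PySem.List.pyGetD line_xs i 0 ∧ PySem.List.pyGetD line_xs i 0 ≤ num2 ∧
            x = PySem.List.pyGetD line_xs i 0 := by
  intro ks
  induction ks with
  | nil => simp
  | cons k ks ih =>
    intro acc x
    simp only [List.foldl_cons, List.mem_cons]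
    rw [ih, pvInnerA, pvMemInnerA]
    aesop

theorem pvNodupOuterA (line_xs line_ys : List Int) (num num1 num2 : Int) :
    ∀ (ks : List Int) (acc : List Int), acc.Nodup →
      (ks.foldl (fun acc k => pvInnerA line_xs line_ys num num1 num2 k acc) acc).Nodup := by
  intro ks
  induction ks with
  | nil => simpa
  | cons k ks ih =>
    intro acc hacc
    simp only [List.foldl_cons]
    exact ih _ (pvNodupInnerA line_xs line_ys num num1 num2 k _ acc hacc)

-- under the precondition, A's final membership condition coincides with B's
theorem pvMemBridge (line_xs line_ys : List Int) (num num1 num2 : Int)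
    (hpre : line_xs.length ≤ line_ys.length) (x : Int) :
    (∃ k ∈ ([-3, -2, -1, 0, 1, 2, 3] : List Int),
        ∃ i ∈ PySem.List.pyRange 0 (line_xs.length : Int) 1,
          PySem.List.pyGetD line_ys i 0 = num + k ∧
          num1 ≤ PySem.List.pyGetD line_xs i 0 ∧ PySem.List.pyGetD line_xs i 0 ≤ num2 ∧
          x = PySem.List.pyGetD line_xs i 0)
      ↔ ∃ p ∈ line_xs.zip line_ys,
          (|p.2 - num| ≤ 3 ∧ num1 ≤ p.1 ∧ p.1 ≤ num2) ∧ x = p.1 := by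
  constructor
  · rintro ⟨k, hk, i, hi, hy, h1, h2, hx⟩
    rw [PySem.List.mem_pyRange_one] at hi
    obtain ⟨hi0, hin⟩ := hi
    have hlt : i.toNat < line_xs.length := by omega
    have hlt' : i.toNat < line_ys.length := by omega
    have hxg : PySem.List.pyGetD line_xs i 0 = line_xs[i.toNat] :=
      PySem.List.pyGetD_eq_getElem _ _ hi0 (by omega)
    have hyg : PySem.List.pyGetD line_ys i 0 = line_ys[i.toNat] :=
      PySem.List.pyGetD_eq_getElem _ _ hi0 (by omega)
    have hk' : k = -3 ∨ k = -2 ∨ k = -1 ∨ k = 0 ∨ k = 1 ∨ k = 2 ∨ k = 3 := by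
      simpa using hk
    rw [hyg] at hy
    rw [hxg] at h1 h2 hx
    refine ⟨(line_xs[i.toNat], line_ys[i.toNat]), ?_, ⟨?_, h1, h2⟩, hx⟩
    · rw [List.mem_iff_getElem]
      exact ⟨i.toNat, by simp [List.length_zip]; omega, by simp [List.getElem_zip]⟩
    · show |line_ys[i.toNat] - num| ≤ 3
      rw [abs_le]
      omega
  · rintro ⟨p, hp, ⟨habs, h1, h2⟩, hx⟩
    rw [List.mem_iff_getElem] at hp
    obtain ⟨j, hj, hpj⟩ := hp
    rw [List.length_zip] at hj
    have hj1 : j < line_xs.length := by omega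
    have hj2 : j < line_ys.length := by omega
    rw [List.getElem_zip] at hpj
    subst hpj
    rw [abs_le] at habs
    refine ⟨line_ys[j] - num, by simp; omega, (j : Int), ?_, ?_, ?_, ?_, ?_⟩
    · rw [PySem.List.mem_pyRange_one]; omega
    · rw [PySem.List.pyGetD_natCast]
      simp [hj2]
    · rw [PySem.List.pyGetD_natCast]
      simpa [List.getD_eq_getElem, hj1] using h1
    · rw [PySem.List.pyGetD_natCast]
      simpa [List.getD_eq_getElem, hj1] using h2
    · rw [PySem.List.pyGetD_natCast]
      simpa [List.getD_eq_getElem, hj1] using hx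

-- ===== VERDICT (by name: the statement is the Claim_ definition above) =====
theorem recognize_line_y_spec : Claim_equal_recognize_line_y := by
  intro line_xs line_ys num num1 num2 _hdom hpre
  unfold Spec_recognize_line_y recognize_line_y recognize_line_y_alt
  congr 1
  apply List.Perm.length_eq
  rw [List.perm_ext_iff_of_nodup
        (pvNodupOuterA line_xs line_ys num num1 num2 _ [] List.nodup_nil)
        (PySem.Set.nodup_ofList _)]
  intro x
  rw [pvMemOuterA, PySem.Set.mem_ofList]
  simp only [List.mem_map, List.mem_filter, List.not_mem_nil, false_or, decide_eq_true_eq]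
  rw [pvMemBridge line_xs line_ys num num1 num2 hpre x]
  constructor
  · rintro ⟨p, hp, hc, hx⟩; exact ⟨p, ⟨hp, hc⟩, hx.symm⟩
  · rintro ⟨p, ⟨hp, hc⟩, hx⟩; exact ⟨p, hp, hc, hx.symm⟩
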